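-- pv_equiv track=rewrite | github.com/BramDevlaminck/DiscreteAlgorithmsCombinatorialGeneration | subsets.py | gray_code_rank
-- ===== SOURCE A (Python) =====
-- def gray_code_rank(n: int, given_subset: set[int]) -> int:
--     """Algorithm 2.4"""
--     rank = 0
--     bit = 0  # b_n = 0
--     for i in range(n - 1, -1, -1):
--         if n - i in given_subset:  # a_i == 1 if n - i in given_subset
--             # this is another way of writing bit = 1 - bit,
--             # which is just a bit flip (if bit == 1, then make it 0, if bit == 0, then make it 1)
--             bit ^= 1
--         if bit == 1:
--             rank += 2 ** i
--     return rank
-- ===== SOURCE B (Python) =====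
-- def gray_code_rank(n: int, given_subset: set[int]) -> int:
--     """Algorithm 2.4 — pack the Gray word into one integer, then xor-shift doubling decode."""
--     g = 0
--     for i in range(n):
--         if n - i in given_subset:
--             g += 2 ** i
--     b = g
--     shift = 1
--     while g >> shift:
--         b ^= b >> shift
--         shift <<= 1
--     return b
-- ===== Notes on version B (the rewrite author's own statement) =====
-- stated objective: alternative
-- what changed: B first packs the membership bits into a single integer g and then decodes it with the standard logarithmic Gray-to-binary doubling loop (b ^= b >> shift; shift <<= 1), instead of A's single descending pass that carries a running parity bit and adds 2**i term by term.
import Mathlib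
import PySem

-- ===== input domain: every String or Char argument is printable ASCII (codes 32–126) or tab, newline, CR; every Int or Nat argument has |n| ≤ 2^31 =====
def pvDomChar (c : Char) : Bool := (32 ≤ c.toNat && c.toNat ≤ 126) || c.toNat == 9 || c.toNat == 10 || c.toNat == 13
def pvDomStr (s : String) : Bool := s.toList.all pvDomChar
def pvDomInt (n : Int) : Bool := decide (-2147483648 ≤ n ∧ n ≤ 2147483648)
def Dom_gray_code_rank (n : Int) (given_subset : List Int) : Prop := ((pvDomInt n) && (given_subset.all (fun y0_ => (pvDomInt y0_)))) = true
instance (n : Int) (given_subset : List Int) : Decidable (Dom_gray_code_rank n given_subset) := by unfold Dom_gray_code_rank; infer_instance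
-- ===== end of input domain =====

-- B packs the membership bits into one integer and decodes it with the iterative
-- Gray-to-binary shift-XOR loop, instead of A's descending pass with a running parity bit
-- (alternative decomposition; same asymptotic cost).

-- ===== PORT A =====
-- literal port: loop over range(n-1, -1, -1) carrying (rank, bit); bit is always 0 or 1 and
-- `bit ^= 1` is written `1 - bit` exactly as A's own comment explains it; 2 ** i is 2 ^ i.toNat (i ≥ 0)
def gray_code_rank (n : Int) (given_subset : List Int) : Int :=
  ((PySem.List.pyRange (n - 1) (-1) (-1)).foldl
    (fun (st : Int × Int) (i : Int) =>
      let bit : Int := if given_subset.contains (n - i) then 1 - st.2 else st.2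
      (if bit = 1 then st.1 + 2 ^ i.toNat else st.1, bit))
    (0, 0)).1

-- ===== PORT B =====
-- Source B's doubling loop `b = g; shift = 1; while g >> shift: b ^= b >> shift; shift <<= 1`;
-- g, b, shift are always ≥ 0 and kept as Nat; shift = 2^j is carried through its exponent j
-- (shift <<= 1 becomes j + 1), which also witnesses termination via the shrinking g >>> 2^j
def grayDecodeFast (b g : Nat) (j : Nat) : Nat :=
  if h : g >>> 2 ^ j = 0 then b
  else grayDecodeFast (b ^^^ b >>> 2 ^ j) g (j + 1)
termination_by g >>> 2 ^ j
decreasing_by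
  have e : g >>> 2 ^ (j + 1) = (g >>> 2 ^ j) >>> 2 ^ j := by
    rw [← Nat.shiftRight_add]; congr 1; ring
  rw [e, Nat.shiftRight_eq_div_pow]
  exact Nat.div_lt_self (Nat.pos_of_ne_zero h) (Nat.one_lt_two_pow (Nat.two_pow_pos j).ne')

def gray_code_rank_alt (n : Int) (given_subset : List Int) : Int :=
  let g : Nat := (PySem.List.pyRange 0 n 1).foldl
    (fun (g : Nat) (i : Int) =>
      if given_subset.contains (n - i) then g + 2 ^ i.toNat else g) 0
  Int.ofNat (grayDecodeFast g g 0)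

-- ===== PRECONDITION & SPEC =====
def Spec_gray_code_rank (n : Int) (given_subset : List Int) (out : Int) : Prop := out = gray_code_rank_alt n given_subset
instance (n : Int) (given_subset : List Int) (out : Int) : Decidable (Spec_gray_code_rank n given_subset out) := by unfold Spec_gray_code_rank; infer_instance

-- ===== CLAIM (what is proved, stated in full; the proofs are below) =====
def Claim_equal_gray_code_rank : Prop := ∀ (n : Int) (given_subset : List Int), Dom_gray_code_rank n given_subset → Spec_gray_code_rank n given_subset (gray_code_rank n given_subset)

-- ===== LEMMAS AND PROOFS =====

-- recursive model of A's descending loop, peeling i = m-1 first; returns (rank added, final bit)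
def pvA (n : Int) (s : List Int) : Nat → Bool → Nat × Bool
  | 0, bit => (0, bit)
  | m + 1, bit =>
    let bit' := if s.contains (n - (m : Int)) then !bit else bit
    let r := pvA n s m bit'
    ((if bit' then 2 ^ m else 0) + r.1, r.2)

-- recursive model of B's packed Gray word over i < m
def pvG (n : Int) (s : List Int) : Nat → Nat
  | 0 => 0
  | m + 1 => (if s.contains (n - (m : Int)) then pvG n s m + 2 ^ m else pvG n s m)

-- the prefix-XOR decode g ^ (g>>1) ^ (g>>2) ^ …, the common value of both programs
def pvD (g : Nat) : Nat :=
  if h : g = 0 then 0 else g ^^^ pvD (g / 2)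
termination_by g
decreasing_by exact Nat.div_lt_self (Nat.pos_of_ne_zero h) one_lt_two

-- pvP s g = g ^ (g>>1) ^ … ^ (g>>(s-1)), the partial decode after s shifts
def pvP : Nat → Nat → Nat
  | 0, _ => 0
  | s + 1, g => g ^^^ pvP s (g / 2)

def bitI (b : Bool) : Int := if b then 1 else 0

theorem pvD_zero : pvD 0 = 0 := by simp [pvD]

theorem pvD_succ (g : Nat) (h : g ≠ 0) : pvD g = g ^^^ pvD (g / 2) := by
  rw [pvD, dif_neg h]

theorem pvP_eq_pvD : ∀ (s g : Nat), g >>> s = 0 → pvP s g = pvD g := by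
  intro s
  induction s with
  | zero =>
    intro g h
    rw [Nat.shiftRight_zero] at h
    subst h; rw [pvD_zero]; rfl
  | succ s ih =>
    intro g h
    have h2 : (g / 2) >>> s = 0 := by
      rw [← Nat.shiftRight_one, ← Nat.shiftRight_add, Nat.add_comm]; exact h
    show g ^^^ pvP s (g / 2) = pvD g
    rw [ih (g / 2) h2]
    by_cases hg : g = 0
    · subst hg; simp [pvD_zero]
    · rw [pvD_succ g hg]

theorem pvP_div : ∀ (t g : Nat), pvP t g / 2 = pvP t (g / 2) := by
  intro t
  induction t with
  | zero => intro g; simp [pvP]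
  | succ t ih =>
    intro g
    show (g ^^^ pvP t (g / 2)) / 2 = g / 2 ^^^ pvP t (g / 2 / 2)
    rw [Nat.xor_div_two, ih (g / 2)]

theorem pvP_shiftRight (t : Nat) : ∀ (s g : Nat), pvP t g >>> s = pvP t (g >>> s) := by
  intro s
  induction s with
  | zero => intro g; simp
  | succ s ih =>
    intro g
    rw [Nat.shiftRight_succ, ih g, pvP_div, ← Nat.shiftRight_succ]

theorem pvP_add : ∀ (s t g : Nat), pvP (s + t) g = pvP s g ^^^ (pvP t g >>> s) := by
  intro s
  induction s with
  | zero =>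
    intro t g
    rw [Nat.zero_add, Nat.shiftRight_zero]
    show pvP t g = 0 ^^^ pvP t g
    rw [Nat.zero_xor]
  | succ s ih =>
    intro t g
    have hs : s + 1 + t = (s + t) + 1 := by omega
    rw [hs]
    show g ^^^ pvP (s + t) (g / 2) = (g ^^^ pvP s (g / 2)) ^^^ (pvP t g >>> (s + 1))
    have h1 : pvP t g >>> (s + 1) = (pvP t g >>> 1) >>> s := by
      rw [← Nat.shiftRight_add, Nat.add_comm]
    rw [ih t (g / 2), h1, Nat.shiftRight_one, pvP_div, Nat.xor_assoc]

theorem fast_correct (g : Nat) :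
    ∀ (v j b : Nat), g >>> 2 ^ j = v → b = pvP (2 ^ j) g → grayDecodeFast b g j = pvD g := by
  intro v
  induction v using Nat.strong_induction_on with
  | _ v ih =>
    intro j b hv hb
    rw [grayDecodeFast]
    by_cases h : g >>> 2 ^ j = 0
    · rw [dif_pos h, hb]; exact pvP_eq_pvD _ g h
    · rw [dif_neg h]
      have e : g >>> 2 ^ (j + 1) = (g >>> 2 ^ j) >>> 2 ^ j := by
        rw [← Nat.shiftRight_add]; congr 1; ring
      have hdec : g >>> 2 ^ (j + 1) < v := by
        subst hv
        rw [e, Nat.shiftRight_eq_div_pow]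
        exact Nat.div_lt_self (Nat.pos_of_ne_zero h) (Nat.one_lt_two_pow (Nat.two_pow_pos j).ne')
      refine ih _ hdec (j + 1) _ rfl ?_
      rw [hb]
      have hp : (2 : Nat) ^ (j + 1) = 2 ^ j + 2 ^ j := by ring
      rw [hp, pvP_add, pvP_shiftRight]

theorem grayDecodeFast_eq_pvD (g : Nat) : grayDecodeFast g g 0 = pvD g := by
  refine fast_correct g (g >>> 2 ^ 0) 0 g rfl ?_
  show g = pvP 1 g
  show g = g ^^^ pvP 0 (g / 2)
  rw [show pvP 0 (g / 2) = 0 from rfl, Nat.xor_zero]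

theorem pvD_lt (g : Nat) : ∀ m : Nat, g < 2 ^ m → pvD g < 2 ^ m := by
  induction g using Nat.strong_induction_on with
  | _ g ih =>
    intro m hg
    by_cases h : g = 0
    · subst h; rw [pvD_zero]; exact hg
    · rw [pvD_succ g h]
      exact Nat.xor_lt_two_pow hg
        (ih (g / 2) (Nat.div_lt_self (Nat.pos_of_ne_zero h) one_lt_two) m
          (lt_of_le_of_lt (Nat.div_le_self g 2) hg))

theorem xor_two_pow_of_lt : ∀ (m g : Nat), g < 2 ^ m → g ^^^ 2 ^ m = g + 2 ^ m := by
  intro m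
  induction m with
  | zero => intro g hg; interval_cases g; decide
  | succ m ih =>
    intro g hg
    have h2 : (2 : Nat) ^ (m + 1) = 2 * 2 ^ m := by ring
    have hq : g / 2 < 2 ^ m := by omega
    have hbit : Nat.bit (decide (g % 2 = 1)) (g >>> 1) = g :=
      Nat.bit_decide_mod_two_eq_one_shiftRight_one g
    have hpow : (2 : Nat) ^ (m + 1) = Nat.bit false (2 ^ m) := by
      simp [Nat.bit_val]; ring
    calc g ^^^ 2 ^ (m + 1)
        = Nat.bit (decide (g % 2 = 1)) (g >>> 1) ^^^ Nat.bit false (2 ^ m) := by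
          rw [hbit, hpow]
      _ = Nat.bit (decide (g % 2 = 1)) (g >>> 1 ^^^ 2 ^ m) := by
          rw [Nat.xor_bit]; simp
      _ = Nat.bit (decide (g % 2 = 1)) (g >>> 1 + 2 ^ m) := by
          rw [ih (g >>> 1) (by simpa [Nat.shiftRight_one] using hq)]
      _ = g + 2 ^ (m + 1) := by
          simp only [Nat.bit_val, Nat.shiftRight_one] at hbit ⊢
          omega

theorem xor_pow_pred (m : Nat) : 2 ^ m ^^^ (2 ^ m - 1) = 2 ^ (m + 1) - 1 := by
  have h1 : (1 : Nat) ≤ 2 ^ m := Nat.one_le_two_pow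
  have h2 : (2 : Nat) ^ (m + 1) = 2 * 2 ^ m := by ring
  rw [Nat.xor_comm, xor_two_pow_of_lt m _ (by omega)]
  omega

theorem pvD_top (m : Nat) : ∀ g : Nat, g < 2 ^ m → pvD (g + 2 ^ m) = pvD g ^^^ (2 ^ (m + 1) - 1) := by
  induction m with
  | zero =>
    intro g hg; interval_cases g
    norm_num
    rw [pvD_succ 1 one_ne_zero]
    norm_num [pvD_zero]
  | succ m ih =>
    intro g hg
    have h2 : (2 : Nat) ^ (m + 1) = 2 * 2 ^ m := by ring
    have hne : g + 2 ^ (m + 1) ≠ 0 := by positivity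
    have hdiv : (g + 2 ^ (m + 1)) / 2 = g / 2 + 2 ^ m := by omega
    have hq : g / 2 < 2 ^ m := by omega
    rw [pvD_succ _ hne, hdiv, ih (g / 2) hq]
    by_cases h : g = 0
    · subst h
      simp only [Nat.zero_div, pvD_zero, Nat.zero_add, Nat.zero_xor]
      exact xor_pow_pred (m + 1)
    · rw [pvD_succ g h]
      have key : (g + 2 ^ (m + 1)) ^^^ (2 ^ (m + 1) - 1) = g ^^^ (2 ^ (m + 1 + 1) - 1) := by
        rw [← xor_two_pow_of_lt (m + 1) g hg, Nat.xor_assoc, xor_pow_pred (m + 1)]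
      calc (g + 2 ^ (m + 1)) ^^^ (pvD (g / 2) ^^^ (2 ^ (m + 1) - 1))
          = ((g + 2 ^ (m + 1)) ^^^ (2 ^ (m + 1) - 1)) ^^^ pvD (g / 2) := by
            rw [Nat.xor_comm (pvD (g / 2)), ← Nat.xor_assoc]
        _ = (g ^^^ (2 ^ (m + 1 + 1) - 1)) ^^^ pvD (g / 2) := by rw [key]
        _ = (g ^^^ pvD (g / 2)) ^^^ (2 ^ (m + 1 + 1) - 1) := by
            rw [Nat.xor_assoc, Nat.xor_comm (2 ^ (m + 1 + 1) - 1), ← Nat.xor_assoc]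

theorem pvG_lt (n : Int) (s : List Int) : ∀ m : Nat, pvG n s m < 2 ^ m := by
  intro m
  induction m with
  | zero => simp [pvG]
  | succ m ih =>
    have h2 : (2 : Nat) ^ (m + 1) = 2 * 2 ^ m := by ring
    unfold pvG; split_ifs <;> omega

theorem key_step (m P X : Nat) (hP : P < 2 ^ m) (hX : X = P ^^^ (2 ^ m - 1)) :
    2 ^ m + X = P ^^^ (2 ^ (m + 1) - 1) := by
  have hX' : X < 2 ^ m := hX ▸ Nat.xor_lt_two_pow hP (by omega)
  have h1 : 2 ^ m + X = X ^^^ 2 ^ m := by rw [xor_two_pow_of_lt m X hX']; omega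
  rw [h1, hX, Nat.xor_assoc, Nat.xor_comm (2 ^ m - 1) (2 ^ m), xor_pow_pred m]

theorem bridge (n : Int) (s : List Int) :
    ∀ (m : Nat) (bit : Bool),
      (pvA n s m bit).1 = pvD (pvG n s m) ^^^ (if bit then 2 ^ m - 1 else 0) := by
  intro m
  induction m with
  | zero => intro bit; cases bit <;> simp [pvA, pvG, pvD_zero]
  | succ m ih =>
    intro bit
    have hG := pvG_lt n s m
    have hD : pvD (pvG n s m) < 2 ^ m := pvD_lt _ m hG
    have h1 : ∀ b : Bool, (pvA n s (m + 1) b).1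
        = (if (if s.contains (n - (m : Int)) then !b else b) then 2 ^ m else 0)
          + (pvA n s m (if s.contains (n - (m : Int)) then !b else b)).1 := fun _ => rfl
    have h2 : pvG n s (m + 1)
        = if s.contains (n - (m : Int)) then pvG n s m + 2 ^ m else pvG n s m := rfl
    rw [h1, h2]
    by_cases ha : n - (m : Int) ∈ s <;> cases bit <;> simp [ha, ih]
    · -- a = true, bit = false → bit' = true
      rw [pvD_top m _ hG]
      exact key_step m (pvD (pvG n s m)) _ hD rfl
    · -- a = true, bit = true → bit' = false
      rw [pvD_top m _ hG, Nat.xor_assoc, Nat.xor_self, Nat.xor_zero]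
    · -- a = false, bit = true → bit' = true
      exact key_step m (pvD (pvG n s m)) _ hD rfl

theorem bitI_flip (b : Bool) : 1 - bitI b = bitI (!b) := by cases b <;> decide

theorem A_fold (n : Int) (s : List Int) :
    ∀ (m : Nat) (bit : Bool) (rank : Int),
      (PySem.List.pyRange ((m : Int) - 1) (-1) (-1)).foldl
        (fun (st : Int × Int) (i : Int) =>
          let b : Int := if s.contains (n - i) then 1 - st.2 else st.2
          (if b = 1 then st.1 + 2 ^ i.toNat else st.1, b))
        (rank, bitI bit)
      = (rank + ((pvA n s m bit).1 : Int), bitI (pvA n s m bit).2) := by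
  intro m
  induction m with
  | zero =>
    intro bit rank
    rw [PySem.List.pyRange_neg_one_eq_nil (by omega)]
    simp [pvA]
  | succ m ih =>
    intro bit rank
    have hcast : ((m + 1 : Nat) : Int) - 1 = (m : Int) := by push_cast; ring
    rw [hcast, PySem.List.pyRange_neg_one_cons (by omega), List.foldl_cons]
    have hbit : (if s.contains (n - (m : Int)) then 1 - bitI bit else bitI bit)
        = bitI (if s.contains (n - (m : Int)) then !bit else bit) := by
      split_ifs <;> simp [bitI_flip]
    simp only [hbit]
    have htn : ((m : Int)).toNat = m := Int.toNat_natCast m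
    have hrank : (if bitI (if s.contains (n - (m : Int)) then !bit else bit) = 1
          then rank + 2 ^ ((m : Int)).toNat else rank)
        = rank + (if (if s.contains (n - (m : Int)) then !bit else bit) then ((2 : Int) ^ m) else 0) := by
      rw [htn]
      cases (if s.contains (n - (m : Int)) then !bit else bit) <;> simp [bitI]
    rw [hrank, ih]
    have hA : pvA n s (m + 1) bit
        = ((if (if s.contains (n - (m : Int)) then !bit else bit) then 2 ^ m else 0)
            + (pvA n s m (if s.contains (n - (m : Int)) then !bit else bit)).1,
           (pvA n s m (if s.contains (n - (m : Int)) then !bit else bit)).2) := rfl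
    rw [hA]
    cases hb : (if s.contains (n - (m : Int)) then !bit else bit) <;> simp [add_assoc]

theorem G_fold (n : Int) (s : List Int) :
    ∀ m : Nat,
      (PySem.List.pyRange 0 (m : Int) 1).foldl
        (fun (g : Nat) (i : Int) =>
          if s.contains (n - i) then g + 2 ^ i.toNat else g) 0
      = pvG n s m := by
  intro m
  induction m with
  | zero => rw [PySem.List.pyRange_one_eq_nil (by omega)]; simp [pvG]
  | succ m ih =>
    have hcast : ((m + 1 : Nat) : Int) = (m : Int) + 1 := by push_cast; ring
    rw [hcast, PySem.List.pyRange_one_succ_right (by omega), List.foldl_append, ih]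
    simp [pvG, Int.toNat_natCast]

-- ===== VERDICT (by name: the statement is the Claim_ definition above) =====
theorem gray_code_rank_spec : Claim_equal_gray_code_rank := by
  unfold Claim_equal_gray_code_rank
  intro n s _
  unfold Spec_gray_code_rank gray_code_rank gray_code_rank_alt
  by_cases hn : n ≤ 0
  · rw [PySem.List.pyRange_neg_one_eq_nil (by omega), PySem.List.pyRange_one_eq_nil (by omega)]
    simp [grayDecodeFast]
  · obtain ⟨m, rfl⟩ : ∃ m : Nat, n = (m : Int) := ⟨n.toNat, by omega⟩
    simp only [G_fold (m : Int) s m]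
    have hA := A_fold (m : Int) s m false 0
    have h0 : bitI false = 0 := rfl
    rw [h0] at hA
    rw [hA]
    show (0 : Int) + ((pvA (m : Int) s m false).1 : Int)
        = Int.ofNat (grayDecodeFast (pvG (m : Int) s m) (pvG (m : Int) s m) 0)
    rw [grayDecodeFast_eq_pvD, bridge (m : Int) s m false]
    simp
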